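-- pv_equiv track=rewrite | github.com/Alves-37/vuchada_backend | app/routers/turnos.py | _dias_to_str
-- ===== SOURCE A (Python) =====
-- from typing import Optional
--
-- def _dias_to_str(dias: Optional[list[int]]) -> Optional[str]:
--     if dias is None:
--         return None
--     cleaned: list[int] = []
--     for d in dias:
--         try:
--             di = int(d)
--         except Exception:
--             continue
--         if 0 <= di <= 6:
--             cleaned.append(di)
--     cleaned = sorted(set(cleaned))
--     return ','.join(str(d) for d in cleaned) if cleaned else None
-- ===== SOURCE B (Python) =====
-- from typing import Optional
--
-- def _dias_to_str(dias: Optional[list[int]]) -> Optional[str]: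
--     if dias is None:
--         return None
--     s = ''
--     for i in range(7):
--         if any(d == i for d in dias):
--             s = s + ',' + str(i) if s else str(i)
--     return s if s else None
-- ===== Notes on version B (the rewrite author's own statement) =====
-- stated objective: alternative
-- what changed: Inverts the traversal: instead of cleaning dias into a list then sorted(set(...)) and join, B loops over the fixed day range 0..6 in order, tests each day for membership in dias, and builds the output string incrementally; no intermediate list, set, sort or join.
import Mathlib
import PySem

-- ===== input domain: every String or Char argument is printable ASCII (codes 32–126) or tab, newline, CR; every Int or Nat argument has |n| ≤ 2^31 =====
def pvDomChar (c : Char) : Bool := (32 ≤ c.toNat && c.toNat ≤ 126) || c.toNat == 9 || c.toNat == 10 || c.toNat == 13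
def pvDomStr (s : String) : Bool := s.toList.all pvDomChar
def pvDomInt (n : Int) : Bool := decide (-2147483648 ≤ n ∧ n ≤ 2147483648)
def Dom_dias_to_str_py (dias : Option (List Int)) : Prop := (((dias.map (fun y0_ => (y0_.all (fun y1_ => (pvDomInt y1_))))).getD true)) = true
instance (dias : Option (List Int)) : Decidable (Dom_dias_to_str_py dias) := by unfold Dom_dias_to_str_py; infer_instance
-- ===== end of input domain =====

-- B inverts the traversal: a loop over the fixed day range 0..6 testing membership in dias and
-- appending to a string accumulator replaces A's clean-list + sorted(set(...)) + join pipeline.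

-- ===== PORT A =====
-- int(d) on an int is the identity and never raises, so the try/except is the identity here.
def dias_to_str_py (dias : Option (List Int)) : Option String :=
  match dias with
  | none => none
  | some ds =>
    let cleaned : List Int :=
      ds.foldl (fun acc d => if 0 ≤ d ∧ d ≤ 6 then acc ++ [d] else acc) []
    let cleaned := PySem.List.sorted (PySem.Set.ofList cleaned) (fun x => x) false
    if cleaned ≠ [] then
      some (PySem.Str.join "," (cleaned.map PySem.Int.toStr))
    else none

-- ===== PORT B =====
-- the string accumulator is kept as List Char (PySem.Chars side) so concatenation is exact;
-- 'any(d == i for d in dias)' is List.any with Int equality.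
def dias_to_str_py_alt (dias : Option (List Int)) : Option String :=
  match dias with
  | none => none
  | some ds =>
    let s : List Char :=
      (PySem.List.pyRange 0 7 1).foldl
        (fun s i =>
          if ds.any (fun d => d == i) then
            (if s ≠ [] then s ++ [','] ++ (PySem.Int.toStr i).toList
             else (PySem.Int.toStr i).toList)
          else s) []
    if s ≠ [] then some (String.ofList s) else none

-- ===== PRECONDITION & SPEC =====
def Spec_dias_to_str_py (dias : Option (List Int)) (out : Option String) : Prop := out = dias_to_str_py_alt dias
instance (dias : Option (List Int)) (out : Option String) : Decidable (Spec_dias_to_str_py dias out) := by unfold Spec_dias_to_str_py; infer_instance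

-- ===== CLAIM (what is proved, stated in full; the proofs are below) =====
def Claim_equal_dias_to_str_py : Prop := ∀ (dias : Option (List Int)), Dom_dias_to_str_py dias → Spec_dias_to_str_py dias (dias_to_str_py dias)

-- ===== LEMMAS AND PROOFS =====

-- strictly increasing rearrangement of set(cleaned), named explicitly
def pvDays (c : List Int) : List Int :=
  [0, 1, 2, 3, 4, 5, 6].filter (fun i => decide (i ∈ c))

lemma pv_sorted_eq_days (c : List Int) (hb : ∀ x ∈ c, 0 ≤ x ∧ x ≤ 6) :
    PySem.List.sorted (PySem.Set.ofList c) (fun x => x) false = pvDays c := by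
  apply PySem.List.sorted_eq_of_perm_of_pairwise_lt
  · have hn1 : (pvDays c).Nodup :=
      List.Nodup.filter _ (by decide : ([0,1,2,3,4,5,6] : List Int).Nodup)
    rw [List.perm_ext_iff_of_nodup hn1 (PySem.Set.nodup_ofList c)]
    intro a
    simp only [pvDays, List.mem_filter, PySem.Set.mem_ofList, decide_eq_true_eq]
    constructor
    · rintro ⟨_, h⟩; exact h
    · intro h
      refine ⟨?_, h⟩
      have := hb a h
      simp only [List.mem_cons, List.not_mem_nil, or_false]
      omega
  · exact List.Pairwise.filter _ (by decide)

lemma pv_join_ne_nil (acc : List (List Char)) (h : ∀ part ∈ acc, part ≠ [])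
    (hacc : acc ≠ []) : PySem.Chars.join [','] acc ≠ [] := by
  match acc with
  | [t] =>
    rw [PySem.Chars.join_singleton]
    exact h t (by simp)
  | t :: q :: rest =>
    rw [PySem.Chars.join_cons_cons]
    have := h t (by simp)
    simp [this]

lemma pv_join_append_cons (sep t : List Char) :
    ∀ (acc : List (List Char)) (a : List Char),
    PySem.Chars.join sep ((a :: acc) ++ [t]) = PySem.Chars.join sep (a :: acc) ++ sep ++ t := by
  intro acc
  induction acc with
  | nil =>
    intro a
    rw [List.cons_append, List.nil_append, PySem.Chars.join_cons_cons,
      PySem.Chars.join_singleton, PySem.Chars.join_singleton]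
  | cons b acc ih =>
    intro a
    have h1 : (a :: b :: acc) ++ [t] = a :: ((b :: acc) ++ [t]) := by simp
    have h2 : (b :: acc) ++ [t] = b :: (acc ++ [t]) := by simp
    rw [h1, h2, PySem.Chars.join_cons_cons, ← h2, ih b, PySem.Chars.join_cons_cons]
    simp [List.append_assoc]

lemma pv_join_append_singleton (sep t : List Char) (acc : List (List Char))
    (hacc : acc ≠ []) :
    PySem.Chars.join sep (acc ++ [t]) = PySem.Chars.join sep acc ++ sep ++ t := by
  cases acc with
  | nil => exact absurd rfl hacc
  | cons a rest => exact pv_join_append_cons sep t rest a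

-- B's day loop extends a comma-joined accumulator exactly like join over the filtered days
lemma pv_fold_join (p : Int → Bool) (l : List Int)
    (hl : ∀ i ∈ l, (PySem.Int.toStr i).toList ≠ []) :
    ∀ acc : List (List Char), (∀ part ∈ acc, part ≠ []) →
    l.foldl (fun s i => if p i then
        (if s ≠ [] then s ++ [','] ++ (PySem.Int.toStr i).toList
         else (PySem.Int.toStr i).toList) else s)
      (PySem.Chars.join [','] acc)
    = PySem.Chars.join [','] (acc ++ (l.filter p).map (fun i => (PySem.Int.toStr i).toList)) := by
  induction l with
  | nil => intro acc _; simp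
  | cons i l ih =>
    intro acc hacc
    have hl' : ∀ j ∈ l, (PySem.Int.toStr j).toList ≠ [] := fun j hj => hl j (by simp [hj])
    simp only [List.foldl_cons, List.filter_cons]
    by_cases hp : p i = true
    · rw [hp, if_pos rfl]
      rcases Decidable.em (acc = []) with he | he
      · subst he
        rw [PySem.Chars.join_nil]
        simp only [ne_eq, not_true_eq_false, if_false]
        have := ih hl' [(PySem.Int.toStr i).toList]
          (by intro part hp'; simp at hp'; subst hp'; simpa using hl i (by simp))
        rw [PySem.Chars.join_singleton] at this
        rw [this]
        simp
      · rw [if_pos (pv_join_ne_nil acc hacc he)]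
        rw [← pv_join_append_singleton [','] _ acc he]
        rw [ih hl' (acc ++ [(PySem.Int.toStr i).toList])
          (by intro part hp'
              rcases List.mem_append.1 hp' with h | h
              · exact hacc part h
              · simp at h; subst h; simpa using hl i (by simp))]
        simp
    · rw [Bool.not_eq_true] at hp
      rw [hp]
      simp only [Bool.false_eq_true, if_false]
      rw [ih hl' acc hacc]

-- ===== VERDICT (by name: the statement is the Claim_ definition above) =====
theorem dias_to_str_py_spec : Claim_equal_dias_to_str_py := by
  intro dias _
  unfold Spec_dias_to_str_py dias_to_str_py dias_to_str_py_alt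
  cases dias with
  | none => rfl
  | some ds =>
    simp only
    rw [PySem.List.foldl_append_ite_eq_filter]
    simp only [List.nil_append]
    set c : List Int := ds.filter (fun d => decide (0 ≤ d ∧ d ≤ 6)) with hc
    have hb : ∀ x ∈ c, 0 ≤ x ∧ x ≤ 6 := by
      intro x hx
      rw [hc, List.mem_filter] at hx
      exact of_decide_eq_true hx.2
    rw [pv_sorted_eq_days c hb]
    have hrange : PySem.List.pyRange 0 7 1 = [0, 1, 2, 3, 4, 5, 6] := by decide
    rw [hrange]
    -- B's membership test agrees with membership in the filtered list for days 0..6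
    have hany : ∀ i ∈ ([0, 1, 2, 3, 4, 5, 6] : List Int),
        ∀ s : List Char,
        (if ds.any (fun d => d == i) then
            (if s ≠ [] then s ++ [','] ++ (PySem.Int.toStr i).toList
             else (PySem.Int.toStr i).toList) else s)
          = (if decide (i ∈ c) then
            (if s ≠ [] then s ++ [','] ++ (PySem.Int.toStr i).toList
             else (PySem.Int.toStr i).toList) else s) := by
      intro i hi s
      have hbnd : 0 ≤ i ∧ i ≤ 6 := by
        simp only [List.mem_cons, List.not_mem_nil, or_false] at hi
        rcases hi with h|h|h|h|h|h|h <;> subst h <;> decide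
      have heq : (ds.any fun d => d == i) = decide (i ∈ c) := by
        rw [hc, Bool.eq_iff_iff]
        simp only [List.any_eq_true, beq_iff_eq, List.mem_filter, decide_eq_true_eq]
        constructor
        · rintro ⟨d, hd, rfl⟩; exact ⟨hd, hbnd⟩
        · rintro ⟨hd, _⟩; exact ⟨i, hd, rfl⟩
      rw [heq]
    rw [PySem.List.foldl_congr_mem _ _ _ _ (fun s i hi => hany i hi s)]
    have hne : ∀ i ∈ ([0, 1, 2, 3, 4, 5, 6] : List Int), (PySem.Int.toStr i).toList ≠ [] := by
      decide
    have hfold := pv_fold_join (fun i => decide (i ∈ c)) [0, 1, 2, 3, 4, 5, 6] hne [] (by simp)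
    rw [PySem.Chars.join_nil, List.nil_append] at hfold
    rw [hfold]
    have hdays : ([0, 1, 2, 3, 4, 5, 6] : List Int).filter (fun i => decide (i ∈ c)) = pvDays c := rfl
    rw [hdays]
    have hparts : ∀ part ∈ (pvDays c).map (fun i => (PySem.Int.toStr i).toList), part ≠ [] := by
      intro part hp
      rcases List.mem_map.1 hp with ⟨i, hi, rfl⟩
      exact hne i (List.mem_filter.1 hi).1
    by_cases hnil : pvDays c = []
    · simp [hnil, PySem.Chars.join_nil]
    · rw [if_pos (by simpa using hnil),
        if_pos (pv_join_ne_nil _ hparts (by simpa using hnil))]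
      congr 1
      have : (PySem.Str.join "," ((pvDays c).map PySem.Int.toStr)).toList
          = PySem.Chars.join [','] ((pvDays c).map (fun i => (PySem.Int.toStr i).toList)) := by
        rw [PySem.Str.toList_join]
        simp [List.map_map, Function.comp_def, PySem.Int.toStr]
      rw [← this, String.ofList_toList]
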